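-- pv_equiv track=rewrite | github.com/yogeshiitm/BT3051-DSA-for-Bio | Assignment 1/EE19B130_Q2.py | find_structure
-- ===== SOURCE A (Python) =====
-- def find_structure(str):
-- 	structure = ""
-- 	for c in str:
-- 		ascii = ord(c)
-- 		if(ascii>=65 and ascii<=90):
-- 			structure += 'A'
-- 		elif(ascii>=97 and ascii<=122):
-- 			structure += 'A'
-- 		elif(ascii>=48 and ascii<=57):
-- 			structure += 'N'
--
-- 	return structure
-- ===== SOURCE B (Python) =====
-- import re
--
-- def find_structure(str):
--     s = re.sub(r'[A-Za-z]', 'A', str)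
--     s = re.sub(r'[0-9]', 'N', s)
--     return re.sub(r'[^AN]', '', s)
-- ===== Notes on version B (the rewrite author's own statement) =====
-- stated objective: idiomatic
-- what changed: Replaces the explicit per-character ord-range branch loop with three regex substitution passes (letters->A, digits->N, delete the rest).
import Mathlib
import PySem

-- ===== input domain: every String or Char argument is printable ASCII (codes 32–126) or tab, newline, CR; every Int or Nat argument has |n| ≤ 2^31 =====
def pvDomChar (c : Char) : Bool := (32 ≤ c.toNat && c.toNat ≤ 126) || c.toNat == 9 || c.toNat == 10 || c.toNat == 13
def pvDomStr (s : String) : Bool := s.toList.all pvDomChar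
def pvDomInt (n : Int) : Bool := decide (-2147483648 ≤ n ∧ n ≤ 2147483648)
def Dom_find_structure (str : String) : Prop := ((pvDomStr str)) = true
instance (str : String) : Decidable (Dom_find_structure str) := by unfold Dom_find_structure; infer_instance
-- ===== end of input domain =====

-- B replaces A's per-character ord-range branch loop with three substitution passes
-- (letters→'A', digits→'N', delete everything else), as regex substitutions in Python (objective: idiomatic).

-- ===== PORT A =====
-- literal transliteration of A's loop: accumulate a string, appending per character
def find_structure (str : String) : String :=
  str.toList.foldl (fun st c =>
    let ascii := c.toNat
    if 65 ≤ ascii ∧ ascii ≤ 90 then st ++ "A"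
    else if 97 ≤ ascii ∧ ascii ≤ 122 then st ++ "A"
    else if 48 ≤ ascii ∧ ascii ≤ 57 then st ++ "N"
    else st) ""

-- ===== PORT B =====
-- pass 1: re.sub(r'[A-Za-z]', 'A', s) — replace each ASCII letter by 'A'
def pvSubLetters (l : List Char) : List Char :=
  l.map (fun c => if (65 ≤ c.toNat ∧ c.toNat ≤ 90) ∨ (97 ≤ c.toNat ∧ c.toNat ≤ 122) then 'A' else c)

-- pass 2: re.sub(r'[0-9]', 'N', s) — replace each ASCII digit by 'N'
def pvSubDigits (l : List Char) : List Char :=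
  l.map (fun c => if 48 ≤ c.toNat ∧ c.toNat ≤ 57 then 'N' else c)

-- pass 3: re.sub(r'[^AN]', '', s) — delete every character that is not 'A' or 'N'
def pvDropOther (l : List Char) : List Char :=
  l.filter (fun c => c == 'A' || c == 'N')

def find_structure_alt (str : String) : String :=
  String.ofList (pvDropOther (pvSubDigits (pvSubLetters str.toList)))

-- ===== PRECONDITION & SPEC =====
def Spec_find_structure (str : String) (out : String) : Prop := out = find_structure_alt str
instance (str : String) (out : String) : Decidable (Spec_find_structure str out) := by unfold Spec_find_structure; infer_instance

-- ===== CLAIM (what is proved, stated in full; the proofs are below) =====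
def Claim_equal_find_structure : Prop := ∀ (str : String), Dom_find_structure str → Spec_find_structure str (find_structure str)

-- ===== LEMMAS AND PROOFS =====
theorem find_structure_foldl (l : List Char) (acc : String) :
    l.foldl (fun st c =>
      let ascii := c.toNat
      if 65 ≤ ascii ∧ ascii ≤ 90 then st ++ "A"
      else if 97 ≤ ascii ∧ ascii ≤ 122 then st ++ "A"
      else if 48 ≤ ascii ∧ ascii ≤ 57 then st ++ "N"
      else st) acc
    = acc ++ String.ofList (pvDropOther (pvSubDigits (pvSubLetters l))) := by
  induction l generalizing acc with
  | nil => simp [pvDropOther, pvSubDigits, pvSubLetters]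
  | cons c l ih =>
    simp only [List.foldl_cons, pvSubLetters, pvSubDigits, pvDropOther, List.map_cons,
      List.filter_cons] at *
    by_cases hU : 65 ≤ c.toNat ∧ c.toNat ≤ 90
    · have h1 : ¬ (48 ≤ ('A' : Char).toNat ∧ ('A' : Char).toNat ≤ 57) := by decide
      simp [hU, ih]
      apply String.toList_injective; simp
    · by_cases hL : 97 ≤ c.toNat ∧ c.toNat ≤ 122
      · simp [hU, hL, ih]
        apply String.toList_injective; simp
      · by_cases hD : 48 ≤ c.toNat ∧ c.toNat ≤ 57
        · simp [hU, hL, hD, ih]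
          apply String.toList_injective; simp
        · -- c is none of the three classes; c ≠ 'A' and c ≠ 'N'
          have hA : (c == 'A') = false :=
            beq_eq_false_iff_ne.mpr (fun h => hU (by subst h; decide))
          have hN : (c == 'N') = false :=
            beq_eq_false_iff_ne.mpr (fun h => hU (by subst h; decide))
          simp [hU, hL, hD, hA, hN, ih]

-- ===== VERDICT (by name: the statement is the Claim_ definition above) =====
theorem find_structure_spec : Claim_equal_find_structure := by
  intro str _
  unfold Spec_find_structure find_structure find_structure_alt
  simpa using find_structure_foldl str.toList ""
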